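-- pv_equiv track=rewrite | github.com/bhanujggandhi/IIITH_SSD | ssd_lab_activity_12/q1.py | maxpressure
-- ===== SOURCE A (Python) =====
-- from collections import deque
--
-- def maxpressure(grid: list[list[str]]) -> int:
--     best = 0
--
--     visited = [[False] * len(grid[0]) for _ in grid]
--
--     def bfs(start_y, start_x) -> int:
--         if visited[start_y][start_x] or int(grid[start_y][start_x]) == 0:
--             return 0
--         area = 0
--
--         q = deque([(start_y, start_x)])
--
--         while q:
--             y, x = q.popleft()
--
--             if visited[y][x]:
--                 continue
--             else:
--                 visited[y][x] = True
--             area += 1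
--             for dy, dx in ((1, 0), (0, 1), (-1, 0), (0, -1)):
--                 if 0 <= dy + y < len(grid) and 0 <= dx + x < len(grid[0]) and int(grid[y + dy][x + dx]) != 0:
--                     q.append((y + dy, x + dx))
--
--         return area
--
--     for i in range(len(grid)):
--         for j in range(len(grid[0])):
--             best = max(best, bfs(i, j))
--
--     return best
-- ===== SOURCE B (Python) =====
-- def maxpressure(grid: list[list[str]]) -> int:
--     rows = len(grid)
--     cols = len(grid[0]) if grid else 0
--     # one disjoint-set-of-lists pass: components as lists, merged edge by edge
--     comps = []
--     for y in range(rows):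
--         for x in range(cols):
--             if int(grid[y][x]) != 0:
--                 comps.append([(y, x)])
--     for y in range(rows):
--         for x in range(cols):
--             if int(grid[y][x]) != 0:
--                 for (ny, nx) in ((y, x + 1), (y + 1, x)):
--                     if ny < rows and nx < cols and int(grid[ny][nx]) != 0:
--                         merged, rest = [], []
--                         for comp in comps:
--                             if (y, x) in comp or (ny, nx) in comp:
--                                 merged += comp
--                             else:
--                                 rest.append(comp)
--                         comps = rest + [merged]
--     return max(map(len, comps), default=0)
-- ===== Notes on version B (the rewrite author's own statement) =====
-- stated objective: alternative
-- what changed: Replaces A's per-cell BFS flood fill (deque + shared visited matrix) by a disjoint-set-of-lists pass: one singleton component per nonzero cell, then each right/down edge merges the components containing its endpoints, and the answer is the largest component list.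
import Mathlib
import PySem

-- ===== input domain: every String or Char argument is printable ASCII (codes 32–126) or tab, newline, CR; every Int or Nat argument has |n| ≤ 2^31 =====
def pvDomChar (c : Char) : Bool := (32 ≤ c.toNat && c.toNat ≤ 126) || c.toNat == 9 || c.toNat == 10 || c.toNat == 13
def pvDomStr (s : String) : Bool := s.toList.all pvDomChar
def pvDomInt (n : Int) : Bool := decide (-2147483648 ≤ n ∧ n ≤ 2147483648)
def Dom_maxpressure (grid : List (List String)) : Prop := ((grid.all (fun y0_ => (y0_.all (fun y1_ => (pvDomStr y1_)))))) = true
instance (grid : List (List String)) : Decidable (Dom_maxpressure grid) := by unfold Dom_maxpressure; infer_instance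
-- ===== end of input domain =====

-- B replaces A's per-cell BFS (deque + visited matrix) by a disjoint-set-of-lists pass that
-- merges components edge by edge; equal return value, no speed claim (objective: alternative).

-- ===== PORT A =====

-- int(grid[y][x]) as a total value; under Pre_ every in-bounds parse succeeds (getD defaults never used there)
def pvVal (g : List (List String)) (y x : Int) : Int :=
  (PySem.Int.ofStr? ((g.getD y.toNat []).getD x.toNat "")).getD 0

-- in-bounds cells, for the termination measure of the BFS loop
def pvAllC (R C : Int) : Finset (Int × Int) :=
  ((PySem.List.pyRange 0 R 1) ×ˢ (PySem.List.pyRange 0 C 1)).toFinset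

-- the `for dy, dx in ((1,0),(0,1),(-1,0),(0,-1)): if in-bounds and nonzero: q.append(...)` body
def pvNbrs (g : List (List String)) (R C y x : Int) : List (Int × Int) :=
  [((1 : Int), (0 : Int)), (0, 1), (-1, 0), (0, -1)].foldl
    (fun acc d =>
      if 0 ≤ d.1 + y ∧ d.1 + y < R ∧ 0 ≤ d.2 + x ∧ d.2 + x < C ∧ pvVal g (y + d.1) (x + d.2) ≠ 0
      then acc ++ [(y + d.1, x + d.2)] else acc) []

-- the `while q:` loop; visited matrix represented as the set of visited cells.
-- The in-bounds test is a totality guard only (queue cells are always in bounds).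
def pvBfsLoop (g : List (List String)) (R C : Int) (V : Finset (Int × Int))
    (q : List (Int × Int)) (area : Nat) : Finset (Int × Int) × Nat :=
  match q with
  | [] => (V, area)
  | c :: rest =>
    if hc : c ∈ pvAllC R C then
      if c ∈ V then pvBfsLoop g R C V rest area
      else pvBfsLoop g R C (insert c V) (rest ++ pvNbrs g R C c.1 c.2) (area + 1)
    else pvBfsLoop g R C V rest area
termination_by (((pvAllC R C) \ V).card, q.length)
decreasing_by
  · apply Prod.Lex.right; simp
  · apply Prod.Lex.left
    have h1 : (pvAllC R C) \ insert c V = ((pvAllC R C) \ V).erase c := by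
      ext y; simp [Finset.mem_sdiff, Finset.mem_erase]; tauto
    rw [h1]
    exact Finset.card_erase_lt_of_mem (Finset.mem_sdiff.mpr ⟨hc, by assumption⟩)
  · apply Prod.Lex.right; simp

def pvBfs (g : List (List String)) (R C : Int) (V : Finset (Int × Int))
    (s : Int × Int) : Finset (Int × Int) × Nat :=
  if s ∈ V ∨ pvVal g s.1 s.2 = 0 then (V, 0)
  else pvBfsLoop g R C V [s] 0

def maxpressure (grid : List (List String)) : Int :=
  let R := PySem.List.len grid
  let C := PySem.List.len (PySem.List.pyGetD grid 0 [])
  let res := (PySem.List.pyRange 0 R 1).foldl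
    (fun st i => (PySem.List.pyRange 0 C 1).foldl
      (fun st j =>
        let r := pvBfs grid R C st.1 (i, j)
        (r.1, max st.2 r.2)) st)
    ((∅ : Finset (Int × Int)), (0 : Nat))
  (res.2 : Int)

-- ===== PORT B =====

-- `merged, rest = [], []; for comp in comps: ...; comps = rest + [merged]`
def pvMergeStep (c n : Int × Int) (comps : List (List (Int × Int))) : List (List (Int × Int)) :=
  let p := comps.foldl
    (fun (mr : List (Int × Int) × List (List (Int × Int))) comp =>
      if c ∈ comp ∨ n ∈ comp then (mr.1 ++ comp, mr.2) else (mr.1, mr.2 ++ [comp]))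
    ([], [])
  p.2 ++ [p.1]

-- body of B's second pass for one cell
def pvCellStep (g : List (List String)) (R C : Int)
    (comps : List (List (Int × Int))) (c : Int × Int) : List (List (Int × Int)) :=
  if pvVal g c.1 c.2 ≠ 0 then
    [(c.1, c.2 + 1), (c.1 + 1, c.2)].foldl
      (fun cs n =>
        if n.1 < R ∧ n.2 < C ∧ pvVal g n.1 n.2 ≠ 0 then pvMergeStep c n cs else cs)
      comps
  else comps

def maxpressure_alt (grid : List (List String)) : Int :=
  let R := PySem.List.len grid
  let C := if grid ≠ [] then PySem.List.len (PySem.List.pyGetD grid 0 []) else 0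
  let comps0 := (PySem.List.pyRange 0 R 1).foldl
    (fun acc y => (PySem.List.pyRange 0 C 1).foldl
      (fun acc x => if pvVal grid y x ≠ 0 then acc ++ [[((y : Int), (x : Int))]] else acc) acc) []
  let comps := (PySem.List.pyRange 0 R 1).foldl
    (fun cs y => (PySem.List.pyRange 0 C 1).foldl
      (fun cs x => pvCellStep grid R C cs (y, x)) cs) comps0
  ((comps.foldl (fun m l => max m l.length) 0 : Nat) : Int)

-- ===== PRECONDITION & SPEC =====
-- Pre_ excludes exactly the inputs on which the Python A raises: a row shorter than row 0
-- (IndexError) and any in-bounds cell whose string int() rejects (ValueError).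
def Pre_maxpressure (grid : List (List String)) : Prop :=
  ∀ row ∈ grid, (grid.headD []).length ≤ row.length ∧
    ∀ j < (grid.headD []).length, (PySem.Int.ofStr? (row.getD j "")).isSome = true
instance (grid : List (List String)) : Decidable (Pre_maxpressure grid) := by
  unfold Pre_maxpressure; infer_instance

def pvWitness_maxpressure : List (List String) := [["1", "0"], ["2", "3"]]

def Spec_maxpressure (grid : List (List String)) (out : Int) : Prop := out = maxpressure_alt grid
instance (grid : List (List String)) (out : Int) : Decidable (Spec_maxpressure grid out) := by
  unfold Spec_maxpressure; infer_instance

-- ===== CLAIM (what is proved, stated in full; the proofs are below) =====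
def Claim_equal_maxpressure : Prop :=
  ∀ (grid : List (List String)), Dom_maxpressure grid → Pre_maxpressure grid →
    Spec_maxpressure grid (maxpressure grid)

-- ===== LEMMAS AND PROOFS =====

def pvGood (g : List (List String)) (R C : Int) (c : Int × Int) : Prop :=
  0 ≤ c.1 ∧ c.1 < R ∧ 0 ≤ c.2 ∧ c.2 < C ∧ pvVal g c.1 c.2 ≠ 0

def pvAdj (c d : Int × Int) : Prop :=
  (c.1 = d.1 ∧ (c.2 = d.2 + 1 ∨ d.2 = c.2 + 1)) ∨ (c.2 = d.2 ∧ (c.1 = d.1 + 1 ∨ d.1 = c.1 + 1))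

theorem pv_mem_foldl_append_if {α β : Type} (p : α → Prop) [DecidablePred p] (f : α → β)
    (l : List α) (acc : List β) (b : β) :
    b ∈ l.foldl (fun acc x => if p x then acc ++ [f x] else acc) acc ↔
      b ∈ acc ∨ ∃ x ∈ l, p x ∧ b = f x := by
  induction l generalizing acc with
  | nil => simp
  | cons h t ih =>
    simp only [List.foldl_cons, ih, List.mem_cons]
    split_ifs with hp <;> simp_all <;> tauto

theorem pv_mem_nbrs (g : List (List String)) (R C y x : Int) (d : Int × Int) :
    d ∈ pvNbrs g R C y x ↔ pvGood g R C d ∧ pvAdj (y, x) d := by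
  rw [pvNbrs, pv_mem_foldl_append_if]
  simp only [List.mem_cons, List.not_mem_nil, false_or, or_false,
    exists_eq_or_imp, exists_eq_left]
  constructor
  · rintro (h | h | h | h) <;> obtain ⟨hg, rfl⟩ := h <;>
      obtain ⟨g1, g2, g3, g4, g5⟩ := hg
    all_goals simp only [pvGood, pvAdj]
    all_goals exact ⟨⟨by omega, by omega, by omega, by omega, by simpa using g5⟩, by simp⟩
  · rintro ⟨⟨b1, b2, b3, b4, hv⟩, hadj⟩
    unfold pvAdj at hadj
    rcases hadj with ⟨e, (e2 | e2)⟩ | ⟨e, (e2 | e2)⟩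
    · -- x = d.2 + 1 : left neighbor, dir (0,-1)
      refine Or.inr (Or.inr (Or.inr ⟨⟨by omega, by omega, by omega, by omega, ?_⟩, ?_⟩))
      · have a1 : y + 0 = d.1 := by omega
        have a2 : x + -1 = d.2 := by omega
        rw [a1, a2]; exact hv
      · have : d = (y + 0, x + -1) := by
          apply Prod.ext <;> simp <;> omega
        exact this
    · refine Or.inr (Or.inl ⟨⟨by omega, by omega, by omega, by omega, ?_⟩, ?_⟩)
      · have a1 : y + 0 = d.1 := by omega
        have a2 : x + 1 = d.2 := by omega
        rw [a1, a2]; exact hv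
      · have : d = (y + 0, x + 1) := by apply Prod.ext <;> simp <;> omega
        exact this
    · refine Or.inr (Or.inr (Or.inl ⟨⟨by omega, by omega, by omega, by omega, ?_⟩, ?_⟩))
      · have a1 : y + -1 = d.1 := by omega
        have a2 : x + 0 = d.2 := by omega
        rw [a1, a2]; exact hv
      · have : d = (y + -1, x + 0) := by apply Prod.ext <;> simp <;> omega
        exact this
    · refine Or.inl ⟨⟨by omega, by omega, by omega, by omega, ?_⟩, ?_⟩
      · have a1 : y + 1 = d.1 := by omega
        have a2 : x + 0 = d.2 := by omega
        rw [a1, a2]; exact hv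
      · have : d = (y + 1, x + 0) := by apply Prod.ext <;> simp <;> omega
        exact this

theorem pvAdj_symm {c d : Int × Int} (h : pvAdj c d) : pvAdj d c := by
  unfold pvAdj at *; omega

def pvRch (g : List (List String)) (R C : Int) (S : (Int × Int) → Prop) (a b : Int × Int) : Prop :=
  Relation.ReflTransGen (fun u v => pvGood g R C v ∧ S v ∧ pvAdj u v) a b

theorem pvRch_mono {g : List (List String)} {R C : Int} {S S' : (Int × Int) → Prop}
    (hSS : ∀ x, S x → S' x) {a b : Int × Int} (h : pvRch g R C S a b) : pvRch g R C S' a b := by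
  induction h with
  | refl => exact Relation.ReflTransGen.refl
  | tail _ hstep ih => exact ih.tail ⟨hstep.1, hSS _ hstep.2.1, hstep.2.2⟩

theorem pvRch_good {g : List (List String)} {R C : Int} {S : (Int × Int) → Prop}
    {a b : Int × Int} (h : pvRch g R C S a b) : b = a ∨ (pvGood g R C b ∧ S b) := by
  induction h with
  | refl => exact Or.inl rfl
  | tail _ hstep _ => exact Or.inr ⟨hstep.1, hstep.2.1⟩

theorem pvRch_symm {g : List (List String)} {R C : Int} {S : (Int × Int) → Prop}
    {a b : Int × Int} (ha : pvGood g R C a) (hSa : S a) (h : pvRch g R C S a b) :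
    pvRch g R C S b a := by
  induction h with
  | refl => exact Relation.ReflTransGen.refl
  | @tail c d hac hstep ih =>
    have hc : pvGood g R C c ∧ S c := by
      rcases pvRch_good hac with rfl | hh
      · exact ⟨ha, hSa⟩
      · exact hh
    exact Relation.ReflTransGen.head ⟨hc.1, hc.2, pvAdj_symm hstep.2.2⟩ ih

theorem pvRch_split {g : List (List String)} {R C : Int} {S₀ : (Int × Int) → Prop}
    {c a d : Int × Int}
    (h : pvRch g R C (fun x => S₀ x ∨ x = c) a d) :
    d = c ∨ pvRch g R C S₀ a d ∨
      (∃ n, pvGood g R C n ∧ S₀ n ∧ pvAdj c n ∧ pvRch g R C S₀ n d) := by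
  induction h with
  | refl => exact Or.inr (Or.inl Relation.ReflTransGen.refl)
  | @tail b d _ hstep ih =>
    by_cases hdc : d = c
    · exact Or.inl hdc
    · have hdS : S₀ d := by
        rcases hstep.2.1 with h | h
        · exact h
        · exact absurd h hdc
      by_cases hbc : b = c
      · subst hbc
        exact Or.inr (Or.inr ⟨d, hstep.1, hdS, hstep.2.2, Relation.ReflTransGen.refl⟩)
      · rcases ih with rfl | hi | ⟨n, hn1, hn2, hn3, hn4⟩
        · exact absurd rfl hbc
        · exact Or.inr (Or.inl (hi.tail ⟨hstep.1, hdS, hstep.2.2⟩))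
        · exact Or.inr (Or.inr ⟨n, hn1, hn2, hn3, hn4.tail ⟨hstep.1, hdS, hstep.2.2⟩⟩)

theorem pv_mem_allC (R C : Int) (c : Int × Int) :
    c ∈ pvAllC R C ↔ (0 ≤ c.1 ∧ c.1 < R) ∧ (0 ≤ c.2 ∧ c.2 < C) := by
  rw [pvAllC, List.mem_toFinset]
  rcases c with ⟨a, b⟩
  simp [SProd.sprod, List.product, List.mem_flatMap, PySem.List.mem_pyRange_one]

theorem pvGood_mem_allC {g : List (List String)} {R C : Int} {c : Int × Int}
    (h : pvGood g R C c) : c ∈ pvAllC R C := by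
  rw [pv_mem_allC]; exact ⟨⟨h.1, h.2.1⟩, h.2.2.1, h.2.2.2.1⟩

theorem pvRch_congr {g : List (List String)} {R C : Int} {S S' : (Int × Int) → Prop}
    (h : ∀ x, S x ↔ S' x) (a b : Int × Int) : pvRch g R C S a b ↔ pvRch g R C S' a b :=
  ⟨pvRch_mono (fun x => (h x).mp), pvRch_mono (fun x => (h x).mpr)⟩

noncomputable def pvNV (g : List (List String)) (R C : Int) (V : Finset (Int × Int))
    (q : List (Int × Int)) : Finset (Int × Int) :=
  @Finset.filter _ (fun d => ∃ s ∈ q, s ∉ V ∧ pvRch g R C (fun x => x ∉ V) s d)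
    (fun _ => Classical.propDecidable _) (pvAllC R C)

theorem pv_mem_NV {g : List (List String)} {R C : Int} {V : Finset (Int × Int)}
    {q : List (Int × Int)} {d : Int × Int} :
    d ∈ pvNV g R C V q ↔ d ∈ pvAllC R C ∧ ∃ s ∈ q, s ∉ V ∧ pvRch g R C (fun x => x ∉ V) s d :=
  @Finset.mem_filter _ _ (fun _ => Classical.propDecidable _) _ _

theorem pvNV_nil (g : List (List String)) (R C : Int) (V : Finset (Int × Int)) :
    pvNV g R C V [] = ∅ := by
  ext d; simp [pv_mem_NV]

theorem pvNV_cons_visited {g : List (List String)} {R C : Int} {V : Finset (Int × Int)}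
    {c : Int × Int} (hc : c ∈ V) (rest : List (Int × Int)) :
    pvNV g R C V (c :: rest) = pvNV g R C V rest := by
  ext d
  simp only [pv_mem_NV, List.mem_cons]
  constructor
  · rintro ⟨hd, s, (rfl | hs), hsV, hr⟩
    · exact absurd hc hsV
    · exact ⟨hd, s, hs, hsV, hr⟩
  · rintro ⟨hd, s, hs, hsV, hr⟩
    exact ⟨hd, s, Or.inr hs, hsV, hr⟩

theorem pv_notMem_NV_self {g : List (List String)} {R C : Int} {V : Finset (Int × Int)}
    {c : Int × Int} (q : List (Int × Int)) : c ∉ pvNV g R C (insert c V) q := by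
  intro h
  rcases pv_mem_NV.mp h with ⟨_, s, _, hsV, hr⟩
  rcases pvRch_good hr with rfl | ⟨_, hcV⟩
  · exact hsV (Finset.mem_insert_self _ _)
  · exact hcV (Finset.mem_insert_self _ _)

theorem pvNV_cons {g : List (List String)} {R C : Int} {V : Finset (Int × Int)}
    {c : Int × Int} (hc : c ∉ V) (hg : pvGood g R C c) (rest : List (Int × Int)) :
    pvNV g R C V (c :: rest) =
      insert c (pvNV g R C (insert c V) (rest ++ pvNbrs g R C c.1 c.2)) := by
  have key : ∀ x : Int × Int, (x ∉ V) ↔ ((x ∉ insert c V) ∨ x = c) := by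
    intro x
    by_cases hx : x = c
    · subst hx; simp [hc]
    · simp [Finset.mem_insert, hx]
  ext d
  rw [pv_mem_NV, Finset.mem_insert, pv_mem_NV]
  constructor
  · rintro ⟨hd, s, hsq, hsV, hr⟩
    rw [pvRch_congr key] at hr
    rcases pvRch_split hr with rfl | hr0 | ⟨n, hn1, hn2, hn3, hn4⟩
    · exact Or.inl rfl
    · by_cases hsc : s = c
      · subst hsc
        rcases Relation.ReflTransGen.cases_head hr0 with rfl | ⟨n, hstep, htl⟩
        · exact Or.inl rfl
        · refine Or.inr ⟨hd, n, ?_, hstep.2.1, htl⟩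
          exact List.mem_append_right _ ((pv_mem_nbrs g R C s.1 s.2 n).mpr ⟨hstep.1, by
            rw [Prod.mk.eta]; exact hstep.2.2⟩)
      · have hs : s ∈ rest := by
          rcases List.mem_cons.mp hsq with rfl | hs
          · exact absurd rfl hsc
          · exact hs
        refine Or.inr ⟨hd, s, List.mem_append_left _ hs, ?_, hr0⟩
        simp only [Finset.mem_insert]
        rintro (rfl | h)
        · exact hsc rfl
        · exact hsV h
    · refine Or.inr ⟨hd, n, ?_, hn2, hn4⟩
      exact List.mem_append_right _ ((pv_mem_nbrs g R C c.1 c.2 n).mpr ⟨hn1, by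
        rw [Prod.mk.eta]; exact hn3⟩)
  · rintro (rfl | h)
    · exact ⟨pvGood_mem_allC hg, d, List.mem_cons_self, hc, Relation.ReflTransGen.refl⟩
    · obtain ⟨hd, s, hsq, hsV, hr⟩ := h
      have hrV : pvRch g R C (fun x => x ∉ V) s d :=
        pvRch_mono (fun x hx => ((key x).mpr (Or.inl hx))) hr
      rcases List.mem_append.mp hsq with hs | hs
      · exact ⟨hd, s, List.mem_cons_of_mem _ hs,
          fun hsV' => hsV (Finset.mem_insert_of_mem hsV'), hrV⟩
      · rcases (pv_mem_nbrs g R C c.1 c.2 s).mp hs with ⟨hgs, hadj⟩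
        refine ⟨hd, c, List.mem_cons_self, hc, Relation.ReflTransGen.head
          ⟨hgs, fun h' => hsV (Finset.mem_insert_of_mem h'), ?_⟩ hrV⟩
        rw [Prod.mk.eta] at hadj; exact hadj

theorem pvBfsLoop_spec (g : List (List String)) (R C : Int) (V : Finset (Int × Int))
    (q : List (Int × Int)) (area : Nat) (hq : ∀ s ∈ q, pvGood g R C s) :
    pvBfsLoop g R C V q area = (V ∪ pvNV g R C V q, area + (pvNV g R C V q).card) := by
  fun_induction pvBfsLoop g R C V q area with
  | case1 => simp [pvNV_nil]
  | case2 V area c rest hcA hcV ih =>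
    rw [ih (fun s hs => hq s (List.mem_cons_of_mem _ hs)), pvNV_cons_visited hcV]
  | case3 V area c rest hcA hcV ih =>
    have hgc : pvGood g R C c := hq c List.mem_cons_self
    have hq' : ∀ s ∈ rest ++ pvNbrs g R C c.1 c.2, pvGood g R C s := by
      intro s hs
      rcases List.mem_append.mp hs with hs | hs
      · exact hq s (List.mem_cons_of_mem _ hs)
      · exact ((pv_mem_nbrs g R C c.1 c.2 s).mp hs).1
    rw [ih hq', pvNV_cons hcV hgc]
    have hcN : c ∉ pvNV g R C (insert c V) (rest ++ pvNbrs g R C c.1 c.2) :=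
      pv_notMem_NV_self _
    rw [Finset.card_insert_of_notMem hcN]
    rw [Prod.mk.injEq]
    refine ⟨?_, by omega⟩
    ext z
    simp only [Finset.mem_insert, Finset.mem_union]
    tauto
  | case4 V area c rest hcA ih =>
    exact absurd (pvGood_mem_allC (hq c List.mem_cons_self)) hcA

def pvClosed (g : List (List String)) (R C : Int) (V : Finset (Int × Int)) : Prop :=
  (∀ v ∈ V, pvGood g R C v) ∧ ∀ v ∈ V, ∀ n, pvGood g R C n → pvAdj v n → n ∈ V

theorem pvRch_out_iff {g : List (List String)} {R C : Int} {V : Finset (Int × Int)}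
    {s d : Int × Int} (hcl : pvClosed g R C V) (hs : s ∉ V) (hgs : pvGood g R C s) :
    pvRch g R C (fun x => x ∉ V) s d ↔ pvRch g R C (fun _ => True) s d := by
  constructor
  · exact pvRch_mono (fun _ _ => trivial)
  · intro h
    suffices hh : d ∉ V ∧ pvRch g R C (fun x => x ∉ V) s d from hh.2
    induction h with
    | refl => exact ⟨hs, Relation.ReflTransGen.refl⟩
    | @tail b d hsb hstep ih =>
      have hgb : pvGood g R C b := by
        rcases pvRch_good hsb with rfl | hh
        · exact hgs
        · exact hh.1
      have hdV : d ∉ V := by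
        intro hdV
        exact ih.1 (hcl.2 d hdV b hgb (pvAdj_symm hstep.2.2))
      exact ⟨hdV, ih.2.tail ⟨hstep.1, hdV, hstep.2.2⟩⟩

noncomputable def pvComp (g : List (List String)) (R C : Int) (c : Int × Int) :
    Finset (Int × Int) :=
  @Finset.filter _ (fun d => pvRch g R C (fun _ => True) c d)
    (fun _ => Classical.propDecidable _) (pvAllC R C)

theorem pv_mem_comp {g : List (List String)} {R C : Int} {c d : Int × Int} :
    d ∈ pvComp g R C c ↔ d ∈ pvAllC R C ∧ pvRch g R C (fun _ => True) c d :=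
  @Finset.mem_filter _ _ (fun _ => Classical.propDecidable _) _ _

theorem pvComp_eq_of_mem {g : List (List String)} {R C : Int} {s v : Int × Int}
    (hgs : pvGood g R C s) (hv : pvRch g R C (fun _ => True) s v) :
    pvComp g R C v = pvComp g R C s := by
  have hgv : pvGood g R C v := by
    rcases pvRch_good hv with rfl | hh
    · exact hgs
    · exact hh.1
  have hvs : pvRch g R C (fun _ => True) v s := pvRch_symm hgs trivial hv
  ext d
  simp only [pv_mem_comp]
  exact ⟨fun ⟨hd, h⟩ => ⟨hd, hv.trans h⟩, fun ⟨hd, h⟩ => ⟨hd, hvs.trans h⟩⟩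

theorem pv_self_mem_comp {g : List (List String)} {R C : Int} {s : Int × Int}
    (hgs : pvGood g R C s) : s ∈ pvComp g R C s :=
  pv_mem_comp.mpr ⟨pvGood_mem_allC hgs, Relation.ReflTransGen.refl⟩

def pvAInv (g : List (List String)) (R C : Int) (V : Finset (Int × Int)) (best : Nat) : Prop :=
  pvClosed g R C V ∧ best = V.sup (fun v => (pvComp g R C v).card)

theorem pvClosed_union_comp {g : List (List String)} {R C : Int} {V : Finset (Int × Int)}
    {s : Int × Int} (hcl : pvClosed g R C V) (hgs : pvGood g R C s) :
    pvClosed g R C (V ∪ pvComp g R C s) := by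
  constructor
  · intro v hv
    rcases Finset.mem_union.mp hv with hv | hv
    · exact hcl.1 v hv
    · rcases pvRch_good (pv_mem_comp.mp hv).2 with rfl | hh
      · exact hgs
      · exact hh.1
  · intro v hv n hgn hadj
    rcases Finset.mem_union.mp hv with hv | hv
    · exact Finset.mem_union_left _ (hcl.2 v hv n hgn hadj)
    · refine Finset.mem_union_right _ (pv_mem_comp.mpr ⟨pvGood_mem_allC hgn, ?_⟩)
      exact ((pv_mem_comp.mp hv).2).tail ⟨hgn, trivial, hadj⟩

theorem pvBfs_step {g : List (List String)} {R C : Int} {V : Finset (Int × Int)} {best : Nat}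
    {s : Int × Int} (hInv : pvAInv g R C V best) (hsA : s ∈ pvAllC R C) :
    pvAInv g R C (pvBfs g R C V s).1 (max best (pvBfs g R C V s).2) ∧
      V ⊆ (pvBfs g R C V s).1 ∧ (pvGood g R C s → s ∈ (pvBfs g R C V s).1) := by
  unfold pvBfs
  split_ifs with h
  · simp only []
    refine ⟨⟨hInv.1, by simpa using hInv.2⟩, Finset.Subset.refl _, ?_⟩
    intro hgs
    rcases h with h | h
    · exact h
    · exact absurd h hgs.2.2.2.2
  · push Not at h
    obtain ⟨hsV, hval⟩ := h
    have hgs : pvGood g R C s := by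
      rcases (pv_mem_allC R C s).mp hsA with ⟨⟨a1, a2⟩, a3, a4⟩
      exact ⟨a1, a2, a3, a4, hval⟩
    rw [pvBfsLoop_spec g R C V [s] 0 (by intro t ht; rcases List.mem_cons.mp ht with rfl | h
                                         · exact hgs
                                         · simp at h)]
    have hNV : pvNV g R C V [s] = pvComp g R C s := by
      ext d
      rw [pv_mem_NV, pv_mem_comp]
      constructor
      · rintro ⟨hd, t, ht, htV, hr⟩
        rcases List.mem_cons.mp ht with rfl | h
        · exact ⟨hd, (pvRch_out_iff hInv.1 htV hgs).mp hr⟩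
        · simp at h
      · rintro ⟨hd, hr⟩
        exact ⟨hd, s, List.mem_cons_self, hsV, (pvRch_out_iff hInv.1 hsV hgs).mpr hr⟩
    have hsup : (pvComp g R C s).sup (fun v => (pvComp g R C v).card) = (pvComp g R C s).card := by
      rw [Finset.sup_congr rfl (fun v hv => by
        rw [pvComp_eq_of_mem hgs (pv_mem_comp.mp hv).2])]
      exact Finset.sup_const ⟨s, pv_self_mem_comp hgs⟩ _
    rw [hNV]
    simp only []
    refine ⟨⟨pvClosed_union_comp hInv.1 hgs, ?_⟩, Finset.subset_union_left,
      fun _ => Finset.mem_union_right _ (pv_self_mem_comp hgs)⟩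
    rw [Finset.sup_union, hsup, ← hInv.2]
    show max best (0 + (pvComp g R C s).card) = best ⊔ (pvComp g R C s).card
    rw [Nat.zero_add]

theorem pvA_fold (g : List (List String)) (R C : Int) (l : List (Int × Int))
    (hl : ∀ s ∈ l, s ∈ pvAllC R C) (V : Finset (Int × Int)) (best : Nat)
    (hInv : pvAInv g R C V best) :
    pvAInv g R C (l.foldl (fun st s =>
        ((pvBfs g R C st.1 s).1, max st.2 (pvBfs g R C st.1 s).2)) (V, best)).1
      (l.foldl (fun st s =>
        ((pvBfs g R C st.1 s).1, max st.2 (pvBfs g R C st.1 s).2)) (V, best)).2 ∧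
    V ⊆ (l.foldl (fun st s =>
        ((pvBfs g R C st.1 s).1, max st.2 (pvBfs g R C st.1 s).2)) (V, best)).1 ∧
    ∀ s ∈ l, pvGood g R C s → s ∈ (l.foldl (fun st s =>
        ((pvBfs g R C st.1 s).1, max st.2 (pvBfs g R C st.1 s).2)) (V, best)).1 := by
  induction l generalizing V best with
  | nil => exact ⟨hInv, Finset.Subset.refl _, by simp⟩
  | cons c t ih =>
    have hcA : c ∈ pvAllC R C := hl c List.mem_cons_self
    have hstep := pvBfs_step hInv hcA
    obtain ⟨h1, h2, h3⟩ := ih (fun s hs => hl s (List.mem_cons_of_mem _ hs)) _ _ hstep.1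
    simp only [List.foldl_cons]
    refine ⟨h1, Finset.Subset.trans hstep.2.1 h2, ?_⟩
    intro s hs hgs
    rcases List.mem_cons.mp hs with rfl | hs
    · exact h2 (hstep.2.2 hgs)
    · exact h3 s hs hgs

noncomputable def pvGoods (g : List (List String)) (R C : Int) : Finset (Int × Int) :=
  @Finset.filter _ (fun c => pvGood g R C c) (fun _ => Classical.propDecidable _) (pvAllC R C)

noncomputable def pvAns (g : List (List String)) (R C : Int) : Nat :=
  (pvGoods g R C).sup (fun v => (pvComp g R C v).card)

theorem pv_nested_foldl {σ : Type} (R C : Int) (f : σ → (Int × Int) → σ) (init : σ) :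
    (PySem.List.pyRange 0 R 1).foldl (fun st i =>
      (PySem.List.pyRange 0 C 1).foldl (fun st j => f st (i, j)) st) init =
    ((PySem.List.pyRange 0 R 1) ×ˢ (PySem.List.pyRange 0 C 1)).foldl f init := by
  show _ = (List.product _ _).foldl f init
  rw [List.product, List.foldl_flatMap]
  congr 1
  funext st i
  rw [List.foldl_map]

theorem pv_maxpressure_eq_ans (g : List (List String)) :
    maxpressure g = (pvAns g (PySem.List.len g) (PySem.List.len (PySem.List.pyGetD g 0 [])) : Int) := by
  unfold maxpressure
  simp only []
  set R := PySem.List.len g with hR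
  set C := PySem.List.len (PySem.List.pyGetD g 0 []) with hC
  rw [pv_nested_foldl R C (fun st s => ((pvBfs g R C st.1 s).1, max st.2 (pvBfs g R C st.1 s).2))
    ((∅ : Finset (Int × Int)), (0 : Nat))]
  have hscan : ∀ s ∈ (PySem.List.pyRange 0 R 1) ×ˢ (PySem.List.pyRange 0 C 1), s ∈ pvAllC R C := by
    intro s hs
    rw [pvAllC, List.mem_toFinset]
    exact hs
  have h0 : pvAInv g R C ∅ 0 := by
    refine ⟨⟨by simp, by simp⟩, by simp⟩
  obtain ⟨hInv, _, hcov⟩ := pvA_fold g R C _ hscan ∅ 0 h0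
  congr 1
  rw [hInv.2]
  apply Finset.sup_congr
  · ext v
    rw [pvGoods, @Finset.mem_filter _ _ (fun _ => Classical.propDecidable _)]
    constructor
    · intro hv
      exact ⟨pvGood_mem_allC (hInv.1.1 v hv), hInv.1.1 v hv⟩
    · rintro ⟨hvA, hgv⟩
      refine hcov v ?_ hgv
      rw [pvAllC, List.mem_toFinset] at hvA
      exact hvA
  · intro _ _; rfl

def pvRE (E : List ((Int × Int) × (Int × Int))) (a b : Int × Int) : Prop :=
  (a, b) ∈ E ∨ (b, a) ∈ E

def pvRchE (E : List ((Int × Int) × (Int × Int))) (a b : Int × Int) : Prop :=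
  Relation.ReflTransGen (pvRE E) a b

theorem pvRchE_symm {E : List ((Int × Int) × (Int × Int))} {a b : Int × Int}
    (h : pvRchE E a b) : pvRchE E b a :=
  Relation.ReflTransGen.symmetric (fun _ _ h => Or.symm h) h

theorem pvRchE_nil {a b : Int × Int} : pvRchE [] a b ↔ b = a := by
  constructor
  · intro h
    induction h with
    | refl => rfl
    | tail _ hstep _ => rcases hstep with h | h <;> simp at h
  · rintro rfl; exact Relation.ReflTransGen.refl

theorem pvRchE_mono {E E' : List ((Int × Int) × (Int × Int))}
    (hEE : ∀ e ∈ E, e ∈ E') {a b : Int × Int} (h : pvRchE E a b) : pvRchE E' a b := by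
  induction h with
  | refl => exact Relation.ReflTransGen.refl
  | tail _ hstep ih =>
    refine ih.tail ?_
    rcases hstep with h | h
    · exact Or.inl (hEE _ h)
    · exact Or.inr (hEE _ h)

theorem pvRchE_cons {E : List ((Int × Int) × (Int × Int))} {c n u v : Int × Int} :
    pvRchE ((c, n) :: E) u v ↔
      pvRchE E u v ∨ (pvRchE E u c ∧ pvRchE E n v) ∨ (pvRchE E u n ∧ pvRchE E c v) := by
  constructor
  · intro h
    induction h with
    | refl => exact Or.inl Relation.ReflTransGen.refl
    | @tail b d _ hstep ih =>
      have hext : ∀ x y : Int × Int, (x, y) ∈ E →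
          (pvRchE E x y) := fun x y hxy => Relation.ReflTransGen.single (Or.inl hxy)
      rcases hstep with hm | hm
      · rcases List.mem_cons.mp hm with he | he
        · -- (b, d) = (c, n)
          have hbc : b = c := congrArg Prod.fst he
          have hdn : d = n := congrArg Prod.snd he
          subst hbc; subst hdn
          rcases ih with h1 | ⟨h1, h2⟩ | ⟨h1, h2⟩
          · exact Or.inr (Or.inl ⟨h1, Relation.ReflTransGen.refl⟩)
          · exact Or.inr (Or.inl ⟨h1, Relation.ReflTransGen.refl⟩)
          · exact Or.inl h1
        · rcases ih with h1 | ⟨h1, h2⟩ | ⟨h1, h2⟩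
          · exact Or.inl (h1.tail (Or.inl he))
          · exact Or.inr (Or.inl ⟨h1, h2.tail (Or.inl he)⟩)
          · exact Or.inr (Or.inr ⟨h1, h2.tail (Or.inl he)⟩)
      · rcases List.mem_cons.mp hm with he | he
        · -- (d, b) = (c, n)
          have hdc : d = c := congrArg Prod.fst he
          have hbn : b = n := congrArg Prod.snd he
          subst hdc; subst hbn
          rcases ih with h1 | ⟨h1, h2⟩ | ⟨h1, h2⟩
          · exact Or.inr (Or.inr ⟨h1, Relation.ReflTransGen.refl⟩)
          · exact Or.inl h1
          · exact Or.inr (Or.inr ⟨h1, Relation.ReflTransGen.refl⟩)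
        · rcases ih with h1 | ⟨h1, h2⟩ | ⟨h1, h2⟩
          · exact Or.inl (h1.tail (Or.inr he))
          · exact Or.inr (Or.inl ⟨h1, h2.tail (Or.inr he)⟩)
          · exact Or.inr (Or.inr ⟨h1, h2.tail (Or.inr he)⟩)
  · have hsub : ∀ x y : Int × Int, pvRchE E x y → pvRchE ((c, n) :: E) x y :=
      fun x y => pvRchE_mono (fun e he => List.mem_cons_of_mem _ he)
    have hcn : pvRchE ((c, n) :: E) c n :=
      Relation.ReflTransGen.single (Or.inl List.mem_cons_self)
    rintro (h | ⟨h1, h2⟩ | ⟨h1, h2⟩)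
    · exact hsub _ _ h
    · exact ((hsub _ _ h1).trans hcn).trans (hsub _ _ h2)
    · exact ((hsub _ _ h1).trans (pvRchE_symm hcn)).trans (hsub _ _ h2)

def pvBInv (g : List (List String)) (R C : Int) (E : List ((Int × Int) × (Int × Int)))
    (comps : List (List (Int × Int))) : Prop :=
  (∀ l ∈ comps, l.Nodup) ∧
  List.Pairwise List.Disjoint comps ∧
  (∀ u, pvGood g R C u → ∃ l ∈ comps, u ∈ l) ∧
  (∀ l ∈ comps, ∀ u ∈ l, ∀ v, v ∈ l ↔ (pvGood g R C v ∧ pvRchE E u v))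

theorem pv_partition_foldl {α : Type} (p : List α → Prop) [DecidablePred p]
    (ls : List (List α)) (m0 : List α) (r0 : List (List α)) :
    ls.foldl (fun mr l => if p l then (mr.1 ++ l, mr.2) else (mr.1, mr.2 ++ [l])) (m0, r0)
      = (m0 ++ (ls.filter (fun l => decide (p l))).flatten,
         r0 ++ ls.filter (fun l => decide (¬ p l))) := by
  induction ls generalizing m0 r0 with
  | nil => simp
  | cons h t ih =>
    by_cases hp : p h
    · simp [hp, ih]
    · simp [hp, ih]

theorem pvMergeStep_eq (c n : Int × Int) (comps : List (List (Int × Int))) :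
    pvMergeStep c n comps =
      comps.filter (fun l => decide (¬ (c ∈ l ∨ n ∈ l))) ++
        [(comps.filter (fun l => decide (c ∈ l ∨ n ∈ l))).flatten] := by
  rw [pvMergeStep]
  rw [pv_partition_foldl (fun l => c ∈ l ∨ n ∈ l) comps [] []]
  simp

theorem pvMergeStep_inv {g : List (List String)} {R C : Int}
    {E : List ((Int × Int) × (Int × Int))} {comps : List (List (Int × Int))}
    {c n : Int × Int} (hInv : pvBInv g R C E comps)
    (hgc : pvGood g R C c) (hgn : pvGood g R C n) :
    pvBInv g R C ((c, n) :: E) (pvMergeStep c n comps) := by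
  obtain ⟨hnd, hpw, hcov, hcls⟩ := hInv
  set M := (comps.filter (fun l => decide (c ∈ l ∨ n ∈ l))).flatten with hM
  set Rst := comps.filter (fun l => decide (¬ (c ∈ l ∨ n ∈ l))) with hRst
  have hmemM : ∀ u, u ∈ M ↔ ∃ l ∈ comps, (c ∈ l ∨ n ∈ l) ∧ u ∈ l := by
    intro u
    rw [hM, List.mem_flatten]
    constructor
    · rintro ⟨l, hl, hu⟩
      rcases List.mem_filter.mp hl with ⟨hl1, hl2⟩
      exact ⟨l, hl1, by simpa using hl2, hu⟩
    · rintro ⟨l, hl, hsel, hu⟩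
      exact ⟨l, List.mem_filter.mpr ⟨hl, by simpa using hsel⟩, hu⟩
  have hmemRst : ∀ l, l ∈ Rst ↔ l ∈ comps ∧ ¬ (c ∈ l ∨ n ∈ l) := by
    intro l
    rw [hRst, List.mem_filter]
    simp
  have hMc : ∀ u, u ∈ M ↔ pvGood g R C u ∧ (pvRchE E c u ∨ pvRchE E n u) := by
    intro u
    rw [hmemM]
    constructor
    · rintro ⟨l, hl, hsel | hsel, hu⟩
      · have := (hcls l hl c hsel u).mp hu
        exact ⟨this.1, Or.inl this.2⟩
      · have := (hcls l hl n hsel u).mp hu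
        exact ⟨this.1, Or.inr this.2⟩
    · rintro ⟨hgu, hr | hr⟩
      · obtain ⟨l, hl, hcl⟩ := hcov c hgc
        exact ⟨l, hl, Or.inl hcl, (hcls l hl c hcl u).mpr ⟨hgu, hr⟩⟩
      · obtain ⟨l, hl, hnl⟩ := hcov n hgn
        exact ⟨l, hl, Or.inr hnl, (hcls l hl n hnl u).mpr ⟨hgu, hr⟩⟩
  rw [pvMergeStep_eq]
  refine ⟨?_, ?_, ?_, ?_⟩
  · -- nodup
    intro l hl
    rcases List.mem_append.mp hl with hl | hl
    · exact hnd l ((hmemRst l).mp hl).1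
    · rcases List.mem_singleton.mp hl with rfl
      rw [List.nodup_flatten]
      exact ⟨fun l hl => hnd l (List.mem_filter.mp hl).1,
        List.Pairwise.sublist List.filter_sublist hpw⟩
  · -- pairwise disjoint
    rw [List.pairwise_append]
    refine ⟨List.Pairwise.sublist List.filter_sublist hpw, List.pairwise_singleton _ _, ?_⟩
    intro l hl m hm
    rcases List.mem_singleton.mp hm with rfl
    rcases (hmemRst l).mp hl with ⟨hlc, hlsel⟩
    intro u hul huM
    rcases (hmemM u).mp huM with ⟨l', hl', hsel', hul'⟩
    have hne : l ≠ l' := by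
      rintro rfl; exact hlsel hsel'
    exact (List.Pairwise.forall (fun _ _ h => h.symm) hpw hlc hl' hne) hul hul'
  · -- cover
    intro u hgu
    obtain ⟨l, hl, hul⟩ := hcov u hgu
    by_cases hsel : c ∈ l ∨ n ∈ l
    · exact ⟨M, List.mem_append_right _ (List.mem_singleton.mpr rfl),
        (hmemM u).mpr ⟨l, hl, hsel, hul⟩⟩
    · exact ⟨l, List.mem_append_left _ ((hmemRst l).mpr ⟨hl, hsel⟩), hul⟩
  · -- classes
    intro l hl u hul v
    rcases List.mem_append.mp hl with hl | hl
    · rcases (hmemRst l).mp hl with ⟨hlc, hlsel⟩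
      rw [hcls l hlc u hul v]
      constructor
      · rintro ⟨hgv, hr⟩
        exact ⟨hgv, pvRchE_mono (fun e he => List.mem_cons_of_mem _ he) hr⟩
      · rintro ⟨hgv, hr⟩
        rcases pvRchE_cons.mp hr with h1 | ⟨h1, h2⟩ | ⟨h1, h2⟩
        · exact ⟨hgv, h1⟩
        · exact absurd ((hcls l hlc u hul c).mpr ⟨hgc, h1⟩) (fun h => hlsel (Or.inl h))
        · exact absurd ((hcls l hlc u hul n).mpr ⟨hgn, h1⟩) (fun h => hlsel (Or.inr h))
    · rcases List.mem_singleton.mp hl with rfl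
      rcases (hMc u).mp hul with ⟨hgu, hru⟩
      have hsub : ∀ x y : Int × Int, pvRchE E x y → pvRchE ((c, n) :: E) x y :=
        fun x y => pvRchE_mono (fun e he => List.mem_cons_of_mem _ he)
      have hcn' : pvRchE ((c, n) :: E) c n :=
        Relation.ReflTransGen.single (Or.inl List.mem_cons_self)
      rw [hMc v]
      constructor
      · rintro ⟨hgv, hrv⟩
        refine ⟨hgv, ?_⟩
        have huc : pvRchE ((c, n) :: E) u c := by
          rcases hru with h | h
          · exact pvRchE_symm (hsub _ _ h)
          · exact (pvRchE_symm (hsub _ _ h)).trans (pvRchE_symm hcn')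
        have hcv : pvRchE ((c, n) :: E) c v := by
          rcases hrv with h | h
          · exact hsub _ _ h
          · exact hcn'.trans (hsub _ _ h)
        exact huc.trans hcv
      · rintro ⟨hgv, hr⟩
        refine ⟨hgv, ?_⟩
        rcases pvRchE_cons.mp hr with h1 | ⟨h1, h2⟩ | ⟨h1, h2⟩
        · rcases hru with h | h
          · exact Or.inl (h.trans h1)
          · exact Or.inr (h.trans h1)
        · exact Or.inr h2
        · exact Or.inl h2

def pvEdgeOK (g : List (List String)) (R C : Int) (e : (Int × Int) × (Int × Int)) : Prop :=
  pvGood g R C e.1 ∧ pvGood g R C e.2 ∧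
    (e.2 = (e.1.1, e.1.2 + 1) ∨ e.2 = (e.1.1 + 1, e.1.2))

set_option maxHeartbeats 1000000 in
theorem pvCellStep_inv {g : List (List String)} {R C : Int}
    {E : List ((Int × Int) × (Int × Int))} {comps : List (List (Int × Int))}
    {c : Int × Int} (hInv : pvBInv g R C E comps) (hcA : c ∈ pvAllC R C) :
    ∃ E', (∀ e, e ∈ E' ↔ e ∈ E ∨ (pvEdgeOK g R C e ∧ e.1 = c)) ∧
      pvBInv g R C E' (pvCellStep g R C comps c) := by
  rcases (pv_mem_allC R C c).mp hcA with ⟨⟨b1, b2⟩, b3, b4⟩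
  unfold pvCellStep
  by_cases hv : pvVal g c.1 c.2 ≠ 0
  · have hgc : pvGood g R C c := ⟨b1, b2, b3, b4, hv⟩
    set n1 : Int × Int := (c.1, c.2 + 1) with hn1
    set n2 : Int × Int := (c.1 + 1, c.2) with hn2
    have hOK : ∀ e, (pvEdgeOK g R C e ∧ e.1 = c) ↔
        ((e = (c, n1) ∧ pvGood g R C n1) ∨ (e = (c, n2) ∧ pvGood g R C n2)) := by
      rintro ⟨e1, e2⟩
      constructor
      · rintro ⟨⟨hg1, hg2, hsh | hsh⟩, he1⟩
        · exact Or.inl ⟨by simp_all, by simp_all⟩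
        · exact Or.inr ⟨by simp_all, by simp_all⟩
      · rintro (⟨he, hg⟩ | ⟨he, hg⟩) <;>
          (rw [Prod.mk.injEq] at he; obtain ⟨rfl, rfl⟩ := he)
        · exact ⟨⟨hgc, hg, Or.inl rfl⟩, rfl⟩
        · exact ⟨⟨hgc, hg, Or.inr rfl⟩, rfl⟩
    have hg1iff : (n1.1 < R ∧ n1.2 < C ∧ pvVal g n1.1 n1.2 ≠ 0) ↔ pvGood g R C n1 := by
      rw [hn1]; unfold pvGood; constructor
      · rintro ⟨x1, x2, x3⟩; exact ⟨by omega, x1, by omega, x2, x3⟩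
      · rintro ⟨x1, x2, x3, x4, x5⟩; exact ⟨x2, x4, x5⟩
    have hg2iff : (n2.1 < R ∧ n2.2 < C ∧ pvVal g n2.1 n2.2 ≠ 0) ↔ pvGood g R C n2 := by
      rw [hn2]; unfold pvGood; constructor
      · rintro ⟨x1, x2, x3⟩; exact ⟨by omega, x1, by omega, x2, x3⟩
      · rintro ⟨x1, x2, x3, x4, x5⟩; exact ⟨x2, x4, x5⟩
    rw [if_pos hv]
    simp only [List.foldl_cons, List.foldl_nil]
    by_cases hgn1 : pvGood g R C n1 <;> by_cases hgn2 : pvGood g R C n2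
    · refine ⟨(c, n2) :: (c, n1) :: E, ?_, ?_⟩
      · intro e
        simp only [List.mem_cons, hOK e]
        tauto
      · rw [if_pos (hg1iff.mpr hgn1), if_pos (hg2iff.mpr hgn2)]
        exact pvMergeStep_inv (pvMergeStep_inv hInv hgc hgn1) hgc hgn2
    · refine ⟨(c, n1) :: E, ?_, ?_⟩
      · intro e
        simp only [List.mem_cons, hOK e]
        tauto
      · rw [if_pos (hg1iff.mpr hgn1), if_neg (fun h => hgn2 (hg2iff.mp h))]
        exact pvMergeStep_inv hInv hgc hgn1
    · refine ⟨(c, n2) :: E, ?_, ?_⟩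
      · intro e
        simp only [List.mem_cons, hOK e]
        tauto
      · rw [if_neg (fun h => hgn1 (hg1iff.mp h)), if_pos (hg2iff.mpr hgn2)]
        exact pvMergeStep_inv hInv hgc hgn2
    · refine ⟨E, ?_, ?_⟩
      · intro e
        rw [hOK e]
        constructor
        · exact Or.inl
        · rintro (h | (⟨_, h⟩ | ⟨_, h⟩))
          · exact h
          · exact absurd h hgn1
          · exact absurd h hgn2
      · rw [if_neg (fun h => hgn1 (hg1iff.mp h)), if_neg (fun h => hgn2 (hg2iff.mp h))]
        exact hInv
  · rw [if_neg hv]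
    refine ⟨E, ?_, hInv⟩
    intro e
    constructor
    · exact Or.inl
    · rintro (h | ⟨⟨hg1, _, _⟩, he1⟩)
      · exact h
      · exact absurd (he1 ▸ hg1).2.2.2.2 (by simpa using hv)

theorem pvB_fold (g : List (List String)) (R C : Int) (l : List (Int × Int))
    (hl : ∀ s ∈ l, s ∈ pvAllC R C) (E : List ((Int × Int) × (Int × Int)))
    (comps : List (List (Int × Int))) (hInv : pvBInv g R C E comps) :
    ∃ E', (∀ e, e ∈ E' ↔ e ∈ E ∨ (pvEdgeOK g R C e ∧ e.1 ∈ l)) ∧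
      pvBInv g R C E' (l.foldl (pvCellStep g R C) comps) := by
  induction l generalizing E comps with
  | nil => exact ⟨E, fun e => by simp, hInv⟩
  | cons c t ih =>
    obtain ⟨E1, hE1, hInv1⟩ := pvCellStep_inv hInv (hl c List.mem_cons_self)
    obtain ⟨E', hE', hInv'⟩ := ih (fun s hs => hl s (List.mem_cons_of_mem _ hs)) E1 _ hInv1
    refine ⟨E', ?_, hInv'⟩
    intro e
    rw [hE' e, hE1 e]
    simp only [List.mem_cons]
    tauto

theorem pvB_base (g : List (List String)) (R C : Int) :
    pvBInv g R C []
      ((((PySem.List.pyRange 0 R 1) ×ˢ (PySem.List.pyRange 0 C 1)).filter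
          (fun s => decide (pvVal g s.1 s.2 ≠ 0))).map (fun s => [s])) := by
  have hmemf : ∀ s : Int × Int,
      s ∈ ((PySem.List.pyRange 0 R 1) ×ˢ (PySem.List.pyRange 0 C 1)).filter
          (fun s => decide (pvVal g s.1 s.2 ≠ 0)) ↔ pvGood g R C s := by
    intro s
    rw [List.mem_filter]
    have : s ∈ (PySem.List.pyRange 0 R 1) ×ˢ (PySem.List.pyRange 0 C 1) ↔ s ∈ pvAllC R C := by
      rw [pvAllC, List.mem_toFinset]
    rw [this, pv_mem_allC]
    unfold pvGood
    constructor
    · rintro ⟨⟨⟨a1, a2⟩, a3, a4⟩, a5⟩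
      exact ⟨a1, a2, a3, a4, by simpa using a5⟩
    · rintro ⟨a1, a2, a3, a4, a5⟩
      exact ⟨⟨⟨a1, a2⟩, a3, a4⟩, by simpa using a5⟩
  refine ⟨?_, ?_, ?_, ?_⟩
  · intro l hl
    rcases List.mem_map.mp hl with ⟨s, _, rfl⟩
    exact List.nodup_singleton s
  · rw [List.pairwise_map]
    have hnd : (((PySem.List.pyRange 0 R 1) ×ˢ (PySem.List.pyRange 0 C 1)).filter
        (fun s => decide (pvVal g s.1 s.2 ≠ 0))).Nodup :=
      ((PySem.List.nodup_pyRange_one 0 R).product (PySem.List.nodup_pyRange_one 0 C)).filter _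
    refine hnd.imp ?_
    intro s t hst
    simp [List.Disjoint, hst]
  · intro u hgu
    exact ⟨[u], List.mem_map.mpr ⟨u, (hmemf u).mpr hgu, rfl⟩, List.mem_singleton.mpr rfl⟩
  · intro l hl u hul v
    rcases List.mem_map.mp hl with ⟨s, hs, rfl⟩
    rcases List.mem_singleton.mp hul with rfl
    rw [List.mem_singleton]
    constructor
    · rintro rfl
      exact ⟨(hmemf v).mp hs, pvRchE_nil.mpr rfl⟩
    · rintro ⟨_, h⟩
      exact (pvRchE_nil.mp h)

theorem pvRchE_iff_rch {g : List (List String)} {R C : Int}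
    {E' : List ((Int × Int) × (Int × Int))}
    (HE : ∀ e, e ∈ E' ↔ pvEdgeOK g R C e) {u : Int × Int} (hgu : pvGood g R C u)
    (v : Int × Int) : pvRchE E' u v ↔ pvRch g R C (fun _ => True) u v := by
  constructor
  · intro h
    induction h with
    | refl => exact Relation.ReflTransGen.refl
    | @tail b d _ hstep ih =>
      rcases hstep with hm | hm
      · rcases (HE _).mp hm with ⟨h1, h2, h3 | h3⟩
        · replace h3 : d = (b.1, b.2 + 1) := by simpa using h3
          exact ih.tail ⟨h2, trivial, by rw [h3]; unfold pvAdj; simp⟩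
        · replace h3 : d = (b.1 + 1, b.2) := by simpa using h3
          exact ih.tail ⟨h2, trivial, by rw [h3]; unfold pvAdj; simp⟩
      · rcases (HE _).mp hm with ⟨h1, h2, h3 | h3⟩
        · replace h3 : b = (d.1, d.2 + 1) := by simpa using h3
          exact ih.tail ⟨h1, trivial, pvAdj_symm (by rw [h3]; unfold pvAdj; simp)⟩
        · replace h3 : b = (d.1 + 1, d.2) := by simpa using h3
          exact ih.tail ⟨h1, trivial, pvAdj_symm (by rw [h3]; unfold pvAdj; simp)⟩
  · intro h
    induction h with
    | refl => exact Relation.ReflTransGen.refl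
    | @tail b d hub hstep ih =>
      have hgb : pvGood g R C b := by
        rcases pvRch_good hub with rfl | hh
        · exact hgu
        · exact hh.1
      obtain ⟨hgd, _, hadj⟩ := hstep
      refine ih.tail ?_
      rcases hadj with ⟨e1, e2 | e2⟩ | ⟨e1, e2 | e2⟩
      · -- b.2 = d.2 + 1 : d is left of b, so (d, b) is a rightward edge
        refine Or.inr ((HE (d, b)).mpr ⟨hgd, hgb, Or.inl ?_⟩)
        apply Prod.ext <;> simp <;> omega
      · -- d.2 = b.2 + 1 : (b, d) rightward
        refine Or.inl ((HE (b, d)).mpr ⟨hgb, hgd, Or.inl ?_⟩)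
        apply Prod.ext <;> simp <;> omega
      · -- b.1 = d.1 + 1 : (d, b) downward
        refine Or.inr ((HE (d, b)).mpr ⟨hgd, hgb, Or.inr ?_⟩)
        apply Prod.ext <;> simp <;> omega
      · -- d.1 = b.1 + 1 : (b, d) downward
        refine Or.inl ((HE (b, d)).mpr ⟨hgb, hgd, Or.inr ?_⟩)
        apply Prod.ext <;> simp <;> omega

theorem pv_foldl_max_le (l : List (List (Int × Int))) (init K : Nat) (h0 : init ≤ K)
    (h : ∀ x ∈ l, x.length ≤ K) :
    l.foldl (fun m x => max m x.length) init ≤ K := by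
  induction l generalizing init with
  | nil => exact h0
  | cons a t ih =>
    simp only [List.foldl_cons]
    exact ih (max init a.length)
      (by have := h a List.mem_cons_self; omega)
      (fun x hx => h x (List.mem_cons_of_mem _ hx))

theorem pv_comp_of_mem {g : List (List String)} {R C : Int}
    {E' : List ((Int × Int) × (Int × Int))} (HE : ∀ e, e ∈ E' ↔ pvEdgeOK g R C e)
    {comps : List (List (Int × Int))} (hInv : pvBInv g R C E' comps)
    {l : List (Int × Int)} (hl : l ∈ comps) {u : Int × Int} (hu : u ∈ l) :
    pvGood g R C u ∧ l.length = (pvComp g R C u).card := by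
  have hcls := hInv.2.2.2
  have hgu : pvGood g R C u := ((hcls l hl u hu u).mp hu).1
  refine ⟨hgu, ?_⟩
  have hset : l.toFinset = pvComp g R C u := by
    ext v
    rw [List.mem_toFinset, hcls l hl u hu v, pv_mem_comp, pvRchE_iff_rch HE hgu]
    constructor
    · rintro ⟨hgv, hr⟩
      exact ⟨pvGood_mem_allC hgv, hr⟩
    · rintro ⟨hvA, hr⟩
      refine ⟨?_, hr⟩
      rcases pvRch_good hr with rfl | hh
      · exact hgu
      · exact hh.1
  rw [← hset, List.toFinset_card_of_nodup (hInv.1 l hl)]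

theorem pv_maxpressure_alt_eq_ans (g : List (List String)) :
    maxpressure_alt g =
      (pvAns g (PySem.List.len g) (PySem.List.len (PySem.List.pyGetD g 0 [])) : Int) := by
  unfold maxpressure_alt
  simp only []
  have hCeq : (if g ≠ [] then PySem.List.len (PySem.List.pyGetD g 0 []) else 0)
      = PySem.List.len (PySem.List.pyGetD g 0 []) := by
    split_ifs with h
    · rfl
    · rw [not_not] at h
      subst h
      rfl
  rw [hCeq]
  set R := PySem.List.len g with hR
  set C := PySem.List.len (PySem.List.pyGetD g 0 []) with hC
  rw [pv_nested_foldl R C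
    (fun acc s => if pvVal g s.1 s.2 ≠ 0 then acc ++ [[s]] else acc) []]
  rw [pv_nested_foldl R C (fun cs s => pvCellStep g R C cs s) _]
  rw [show (fun (acc : List (List (Int × Int))) (s : Int × Int) =>
        if pvVal g s.1 s.2 ≠ 0 then acc ++ [[s]] else acc)
      = (fun acc s => if (fun (s : Int × Int) => decide (pvVal g s.1 s.2 ≠ 0)) s = true
          then acc ++ [(fun (s : Int × Int) => [s]) s] else acc) by
    funext acc s; simp]
  rw [PySem.List.foldl_append_if _ _ _ _]
  rw [List.nil_append]
  have hscan : ∀ s ∈ (PySem.List.pyRange 0 R 1) ×ˢ (PySem.List.pyRange 0 C 1),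
      s ∈ pvAllC R C := by
    intro s hs
    rw [pvAllC, List.mem_toFinset]
    exact hs
  obtain ⟨E', HE', hInv⟩ := pvB_fold g R C _ hscan [] _ (pvB_base g R C)
  have HE : ∀ e, e ∈ E' ↔ pvEdgeOK g R C e := by
    intro e
    rw [HE' e]
    constructor
    · rintro (h | ⟨h, _⟩)
      · simp at h
      · exact h
    · intro h
      refine Or.inr ⟨h, ?_⟩
      have := pvGood_mem_allC h.1
      rw [pvAllC, List.mem_toFinset] at this
      exact this
  congr 1
  apply Nat.le_antisymm
  · apply pv_foldl_max_le _ _ _ (Nat.zero_le _)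
    intro l hl
    rcases l with _ | ⟨u, t⟩
    · simp
    · have hu : u ∈ u :: t := List.mem_cons_self
      obtain ⟨hgu, hlen⟩ := pv_comp_of_mem HE hInv hl hu
      rw [hlen]
      refine Finset.le_sup (f := fun v => (pvComp g R C v).card) ?_
      rw [pvGoods, @Finset.mem_filter _ _ (fun _ => Classical.propDecidable _)]
      exact ⟨pvGood_mem_allC hgu, hgu⟩
  · rw [pvAns]
    apply Finset.sup_le
    intro v hv
    have hgv : pvGood g R C v :=
      ((@Finset.mem_filter _ _ (fun _ => Classical.propDecidable _) _ _).mp hv).2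
    obtain ⟨l, hl, hvl⟩ := hInv.2.2.1 v hgv
    obtain ⟨_, hlen⟩ := pv_comp_of_mem HE hInv hl hvl
    rw [← hlen]
    exact (PySem.List.le_foldl_max_nat _ List.length 0).2 l hl

theorem pv_ports_equal (g : List (List String)) : maxpressure g = maxpressure_alt g := by
  rw [pv_maxpressure_eq_ans, pv_maxpressure_alt_eq_ans]

-- ===== VERDICT (by name: the statement is the Claim_ definition above) =====
theorem maxpressure_spec : Claim_equal_maxpressure := by
  intro grid _ _
  unfold Spec_maxpressure
  exact pv_ports_equal grid
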